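-- pv_equiv track=rewrite | github.com/procgen/Substitution-Cipher | analysis.py | doubleLetterAnalysis
-- ===== SOURCE A (Python) =====
-- def doubleLetterAnalysis(msg):
--     freqMap = {}
--     for i in range(0, len(msg) - 1):
--         if msg[i] == msg[i + 1]:
--             x = msg[i]
--             if x in freqMap:
--                 freqMap[x] = freqMap[x] + 1
--             else:
--                 freqMap[x] = 1
--     return freqMap
-- ===== SOURCE B (Python) =====
-- def doubleLetterAnalysis(msg):
--     freqMap = {}
--     n = len(msg)
--     i = 0
--     while i < n:
--         j = i + 1
--         while j < n and msg[j] == msg[i]: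
--             j += 1
--         if j - i > 1:
--             ch = msg[i]
--             freqMap[ch] = freqMap.get(ch, 0) + (j - i - 1)
--         i = j
--     return freqMap
-- ===== Notes on version B (the rewrite author's own statement) =====
-- stated objective: alternative
-- what changed: Replaces the per-index adjacent-pair comparison with a two-pointer scan over maximal runs of equal characters, performing one dict update of L-1 per run instead of one per repeated pair.
import Mathlib
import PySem

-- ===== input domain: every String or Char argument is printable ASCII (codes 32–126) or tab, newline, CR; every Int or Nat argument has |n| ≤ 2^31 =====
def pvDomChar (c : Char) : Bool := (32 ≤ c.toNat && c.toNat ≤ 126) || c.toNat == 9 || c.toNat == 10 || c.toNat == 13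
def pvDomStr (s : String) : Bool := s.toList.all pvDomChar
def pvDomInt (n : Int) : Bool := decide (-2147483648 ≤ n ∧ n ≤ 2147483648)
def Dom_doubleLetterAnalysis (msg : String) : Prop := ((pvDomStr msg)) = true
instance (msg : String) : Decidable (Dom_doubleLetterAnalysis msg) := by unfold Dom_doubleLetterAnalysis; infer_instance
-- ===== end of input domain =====

-- B replaces A's per-index adjacent-pair comparison with a two-pointer scan over maximal
-- runs of equal characters: one dict update per run instead of one per repeated pair.

-- ===== PORT A =====
-- for i in range(0, len(msg)-1): if msg[i] == msg[i+1]: increment freqMap[msg[i]]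
def doubleLetterAnalysis (msg : String) : List (String × Int) :=
  let cs := msg.toList
  let freqMap :=
    (PySem.List.pyRange 0 ((cs.length : Int) - 1) 1).foldl
      (fun d i =>
        if PySem.List.pyGetD cs i ' ' == PySem.List.pyGetD cs (i + 1) ' ' then
          let x := String.ofList [PySem.List.pyGetD cs i ' ']
          if d.contains x then d.insert x (d.getD x 0 + 1) else d.insert x 1
        else d)
      PySem.Dict.empty
  freqMap.items

-- ===== PORT B =====
-- while i < n: scan the maximal run msg[i..j); if its length L > 1 add L-1 to freqMap[msg[i]]
def pvRuns (d : PySem.Dict String Int) (cs : List Char) : PySem.Dict String Int :=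
  match cs with
  | [] => d
  | c :: rest =>
    let t := rest.takeWhile (fun x => x == c)
    let r := rest.dropWhile (fun x => x == c)
    let runLen : Int := (t.length : Int) + 1
    let d' := if 1 < runLen then
                d.insert (String.ofList [c]) (d.getD (String.ofList [c]) 0 + (runLen - 1))
              else d
    pvRuns d' r
termination_by cs.length
decreasing_by
  simp only [List.length_cons]
  exact Nat.lt_succ_of_le (List.length_dropWhile_le _ _)

def doubleLetterAnalysis_alt (msg : String) : List (String × Int) :=
  (pvRuns PySem.Dict.empty msg.toList).items

-- ===== PRECONDITION & SPEC =====
def Spec_doubleLetterAnalysis (msg : String) (out : List (String × Int)) : Prop := out = doubleLetterAnalysis_alt msg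
instance (msg : String) (out : List (String × Int)) : Decidable (Spec_doubleLetterAnalysis msg out) := by unfold Spec_doubleLetterAnalysis; infer_instance

-- ===== CLAIM (what is proved, stated in full; the proofs are below) =====
def Claim_equal_doubleLetterAnalysis : Prop := ∀ (msg : String), Dom_doubleLetterAnalysis msg → Spec_doubleLetterAnalysis msg (doubleLetterAnalysis msg)

-- ===== LEMMAS AND PROOFS =====

-- A's loop body as a step on an adjacent pair
def pvStep (d : PySem.Dict String Int) (p : Char × Char) : PySem.Dict String Int :=
  if p.1 == p.2 then
    let x := String.ofList [p.1]
    if d.contains x then d.insert x (d.getD x 0 + 1) else d.insert x 1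
  else d

def pvAdjFold (cs : List Char) (d : PySem.Dict String Int) : PySem.Dict String Int :=
  (cs.zip cs.tail).foldl pvStep d

lemma pvRuns_nil (d : PySem.Dict String Int) : pvRuns d [] = d := by rw [pvRuns]

lemma pvStep_eq (d : PySem.Dict String Int) (x : Char) :
    pvStep d (x, x) = d.insert (String.ofList [x]) (d.getD (String.ofList [x]) 0 + 1) := by
  unfold pvStep
  simp only [beq_self_eq_true, if_true]
  by_cases h : d.contains (String.ofList [x]) = true
  · simp [h]
  · simp only [Bool.not_eq_true] at h
    rw [if_neg (by simp [h]), PySem.Dict.getD_of_not_contains _ _ h]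
    norm_num

lemma pvStep_ne (d : PySem.Dict String Int) (x y : Char) (h : x ≠ y) :
    pvStep d (x, y) = d := by
  unfold pvStep
  simp [h]

-- A's indexed loop is the fold of pvStep over adjacent pairs
lemma pvA_eq_adjFold (msg : String) :
    doubleLetterAnalysis msg = (pvAdjFold msg.toList PySem.Dict.empty).items := by
  simp only [doubleLetterAnalysis]
  unfold pvAdjFold
  congr 1
  have hmap :
      (PySem.List.pyRange 0 ((msg.toList.length : Int) - 1) 1).map
        (fun i => (PySem.List.pyGetD msg.toList i ' ', PySem.List.pyGetD msg.toList (i + 1) ' '))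
      = msg.toList.zip msg.toList.tail := by
    apply List.ext_getElem
    · simp [PySem.List.length_pyRange_one]
    · intro k h1 h2
      have hk : k < msg.toList.length - 1 := by
        simpa [PySem.List.length_pyRange_one] using h1
      simp only [List.getElem_map, List.getElem_zip, List.getElem_tail,
        PySem.List.getElem_pyRange_one, zero_add]
      have h1' : (k : Int) + 1 = ((k + 1 : Nat) : Int) := by push_cast; ring
      rw [h1', PySem.List.pyGetD_natCast, PySem.List.pyGetD_natCast,
        List.getD_eq_getElem _ _ (by omega), List.getD_eq_getElem _ _ (by omega)]
  rw [← hmap, List.foldl_map]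
  rfl

-- pvAdjFold peels a cons of two
lemma pvAdjFold_cons_cons (x y : Char) (tl : List Char) (d : PySem.Dict String Int) :
    pvAdjFold (x :: y :: tl) d = pvAdjFold (y :: tl) (pvStep d (x, y)) := by
  simp [pvAdjFold, List.zip_cons_cons]

-- j successive increments while still inside a run of c
lemma pvAdjFold_replicate (c : Char) (r : List Char) :
    ∀ (j : Nat) (d : PySem.Dict String Int),
      pvAdjFold (List.replicate j c ++ (c :: r)) d
        = pvAdjFold (c :: r)
            (if j = 0 then d
             else d.insert (String.ofList [c]) (d.getD (String.ofList [c]) 0 + (j : Int))) := by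
  intro j
  induction j with
  | zero => intro d; simp
  | succ j ih =>
    intro d
    have hpeel : pvAdjFold (List.replicate (j + 1) c ++ (c :: r)) d
        = pvAdjFold (List.replicate j c ++ (c :: r)) (pvStep d (c, c)) := by
      cases j with
      | zero =>
        simp only [List.replicate_succ, List.replicate_zero, List.cons_append, List.nil_append]
        exact pvAdjFold_cons_cons c c r d
      | succ j =>
        rw [List.replicate_succ, List.cons_append,
          show List.replicate (j + 1) c ++ (c :: r) = c :: (List.replicate j c ++ (c :: r)) by
            rw [List.replicate_succ, List.cons_append]]
        exact pvAdjFold_cons_cons c c _ d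
    rw [hpeel, pvStep_eq, ih]
    cases j with
    | zero => simp
    | succ j =>
      simp only [Nat.succ_ne_zero, if_false]
      rw [PySem.Dict.insert_insert_self, PySem.Dict.getD_insert_self]
      congr 1
      push_cast
      ring_nf
  
lemma pv_takeWhile_replicate (c : Char) (rest : List Char) :
    rest.takeWhile (fun x => x == c) = List.replicate (rest.takeWhile (fun x => x == c)).length c := by
  apply List.eq_replicate_of_mem
  intro b hb
  have := List.mem_takeWhile_imp hb
  simpa using this

lemma pv_dropWhile_head_ne (c y : Char) (rest r' : List Char)
    (h : rest.dropWhile (fun x => x == c) = y :: r') : y ≠ c := by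
  induction rest with
  | nil => simp [List.dropWhile] at h
  | cons a l ih =>
    rw [List.dropWhile_cons] at h
    by_cases hac : (a == c) = true
    · rw [if_pos hac] at h; exact ih h
    · rw [if_neg hac] at h
      cases h
      simpa using hac

-- main bridge: the adjacent-pair fold equals the run scan
lemma pvAdjFold_eq_runs :
    ∀ (n : Nat) (cs : List Char) (d : PySem.Dict String Int), cs.length ≤ n →
      pvAdjFold cs d = pvRuns d cs := by
  intro n
  induction n with
  | zero =>
    intro cs d h
    have hnil : cs = [] := by
      cases cs with
      | nil => rfl
      | cons a l => simp at h
    subst hnil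
    rw [pvRuns_nil]
    rfl
  | succ n ih =>
    intro cs d h
    match cs with
    | [] => rw [pvRuns_nil]; rfl
    | c :: rest =>
      set t := rest.takeWhile (fun x => x == c) with ht
      set r := rest.dropWhile (fun x => x == c) with hr
      have hsplit : rest = t ++ r := (List.takeWhile_append_dropWhile).symm
      have htrep : t = List.replicate t.length c := pv_takeWhile_replicate c rest
      have hcs : c :: rest = List.replicate t.length c ++ (c :: r) := by
        conv_lhs => rw [hsplit, htrep]
        rw [show c :: (List.replicate t.length c ++ r) = List.replicate (t.length + 1) c ++ r from by
            rw [List.replicate_succ, List.cons_append],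
          List.replicate_succ', List.append_assoc, List.singleton_append]
      have hd' : pvRuns d (c :: rest) =
          pvRuns (if t.length = 0 then d
                  else d.insert (String.ofList [c]) (d.getD (String.ofList [c]) 0 + (t.length : Int))) r := by
        rw [pvRuns]
        by_cases h0 : t.length = 0
        · simp [← ht, ← hr, h0]
        · have h1 : (1 : Int) < (t.length : Int) + 1 := by
            have := Nat.one_le_iff_ne_zero.mpr h0
            omega
          simp [← ht, ← hr, h0, h1]
      have hrlen : r.length ≤ n := by
        have hle : r.length ≤ rest.length := List.length_dropWhile_le _ _
        simp only [List.length_cons] at h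
        omega
      rw [hd', ← ih r _ hrlen, hcs, pvAdjFold_replicate]
      cases hrr : r with
      | nil => rfl
      | cons y r' =>
        have hyc : y ≠ c := pv_dropWhile_head_ne c y rest r' (hr ▸ hrr)
        rw [pvAdjFold_cons_cons, pvStep_ne _ _ _ (Ne.symm hyc)]

-- ===== VERDICT (by name: the statement is the Claim_ definition above) =====
theorem doubleLetterAnalysis_spec : Claim_equal_doubleLetterAnalysis := by
  intro msg _
  unfold Spec_doubleLetterAnalysis doubleLetterAnalysis_alt
  rw [pvA_eq_adjFold, pvAdjFold_eq_runs msg.toList.length msg.toList _ le_rfl]
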